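-- pv_equiv track=rewrite | github.com/WiTheR60334/cse205-ds | Assignments/30-10-2023/506.py | findRelativeRanks
-- ===== SOURCE A (Python) =====
-- from typing import List
--
-- def findRelativeRanks(score: List[int]) -> List[str]:
--     temp=sorted(score)[::-1]
--     medals=["Gold Medal","Silver Medal","Bronze Medal"]
--     dict={}
--     for i in temp:
--         if medals:
--             dict[i]=medals[0]
--             medals.pop(0)
--         else:
--             dict[i]=str(temp.index(i)+1)
--     ans=[]
--     for i in score:
--         ans.append(dict[i])
--     return ans
-- ===== SOURCE B (Python) =====
-- from typing import List
--
-- def findRelativeRanks(score: List[int]) -> List[str]: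
--     medals = ["Gold Medal", "Silver Medal", "Bronze Medal"]
--     ans = []
--     for v in score:
--         r = sum(1 for x in score if x > v)  # rank = number of strictly greater scores
--         ans.append(medals[r] if r < 3 else str(r + 1))
--     return ans
-- ===== Notes on version B (the rewrite author's own statement) =====
-- stated objective: alternative
-- what changed: B does no sorting and builds no dictionary at all: each score's rank is computed directly as 1 + the number of strictly greater scores (competition ranking), replacing A's sort + destructive medal popping + per-element temp.index scans.
-- outside the precondition, e.g. on findRelativeRanks([0, 0]): A returns ['Silver Medal', 'Silver Medal'], B returns ['Gold Medal', 'Gold Medal']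
import Mathlib
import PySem

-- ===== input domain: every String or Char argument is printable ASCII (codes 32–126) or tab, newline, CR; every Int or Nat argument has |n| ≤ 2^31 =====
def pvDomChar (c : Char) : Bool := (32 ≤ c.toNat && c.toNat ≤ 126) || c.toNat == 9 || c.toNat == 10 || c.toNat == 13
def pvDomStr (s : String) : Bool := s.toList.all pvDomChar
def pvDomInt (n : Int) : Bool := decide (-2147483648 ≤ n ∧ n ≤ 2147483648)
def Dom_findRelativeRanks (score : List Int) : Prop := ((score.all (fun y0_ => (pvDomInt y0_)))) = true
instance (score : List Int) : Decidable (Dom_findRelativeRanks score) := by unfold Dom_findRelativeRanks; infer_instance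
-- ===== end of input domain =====

-- B drops A's sort, medal popping and dict entirely: each score's rank is 1 + the number of
-- strictly greater scores (objective: alternative algorithm; no speed claimed by the theorems).

-- ===== PORT A =====
def pvMedals : List String := ["Gold Medal", "Silver Medal", "Bronze Medal"]

-- one iteration of A's 'for i in temp' loop; state = (dict, remaining medals list)
-- 'dict[i]=str(temp.index(i)+1)': index? is always some here (i ∈ temp), so getD 0 is exact
def pvStepA (temp : List Int) (st : PySem.Dict Int String × List String) (i : Int) :
    PySem.Dict Int String × List String :=
  match st.2 with
  | m :: ms => (st.1.insert i m, ms)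
  | [] => (st.1.insert i (PySem.Int.toStr (((PySem.List.index? temp i).getD 0 : Int) + 1)), [])

def findRelativeRanks (score : List Int) : List String :=
  -- sorted(score)[::-1]; slice? with step -1 is always some
  let temp := (PySem.List.slice? (PySem.List.sorted score (fun x => x) false) none none (-1)).getD []
  let st := temp.foldl (pvStepA temp) (PySem.Dict.empty, pvMedals)
  -- 'ans.append(dict[i])': every i ∈ score is a key of dict, so getD "" is exact
  score.foldl (fun ans i => ans ++ [st.1.getD i ""]) []

-- ===== PORT B =====
-- 'sum(1 for x in score if x > v)' ported as countP (the corresponding Lean library count)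
def findRelativeRanks_alt (score : List Int) : List String :=
  score.foldl (fun ans v =>
    let r := score.countP (fun x => decide (v < x))
    ans ++ [if r < 3 then pvMedals.getD r "" else PySem.Int.toStr ((r : Int) + 1)]) []

-- ===== PRECONDITION & SPEC =====
-- Pre_ excludes lists with duplicate scores: there A's value for a duplicate is an accident of
-- dict re-insertion overwriting and first-occurrence .index (ranks problem inputs are distinct),
-- and B's competition-style rank is an equally defensible choice on that unspecified corner.
def Pre_findRelativeRanks (score : List Int) : Prop := score.Nodup
instance (score : List Int) : Decidable (Pre_findRelativeRanks score) := by
  unfold Pre_findRelativeRanks; infer_instance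
def pvWitness_findRelativeRanks : List Int := [10, 3, 8, 9, 4]

def Spec_findRelativeRanks (score : List Int) (out : List String) : Prop :=
  out = findRelativeRanks_alt score
instance (score : List Int) (out : List String) : Decidable (Spec_findRelativeRanks score out) := by
  unfold Spec_findRelativeRanks; infer_instance

-- ===== CLAIM (what is proved, stated in full; the proofs are below) =====
def Claim_equal_findRelativeRanks : Prop :=
  ∀ (score : List Int), Dom_findRelativeRanks score → Pre_findRelativeRanks score →
    Spec_findRelativeRanks score (findRelativeRanks score)

-- ===== LEMMAS AND PROOFS =====

-- the rank string both programs produce for a score of rank r (0-based)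
def pvRank (r : Nat) : String :=
  if r < 3 then pvMedals.getD r "" else PySem.Int.toStr ((r : Int) + 1)

theorem pv_drop_medals (k : Nat) (hk : k < 3) :
    pvMedals.drop k = pvMedals.getD k "" :: pvMedals.drop (k + 1) :=
  match k with
  | 0 => rfl
  | 1 => rfl
  | 2 => rfl
  | n + 3 => absurd hk (by omega)

-- A's loop invariant: after processing the prefix 'pre', the dict maps v (∉ keys yet) as the
-- continuation will; we characterise the FINAL dict's value at each element of the suffix.
theorem pv_loop_getD (t : List Int) (ht : t.Nodup) :
    ∀ (suf pre : List Int) (d : PySem.Dict Int String), t = pre ++ suf →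
      ∀ v ∈ suf,
        ((suf.foldl (pvStepA t) (d, pvMedals.drop pre.length)).1).getD v ""
          = pvRank (pre.length + ((PySem.List.index? suf v).getD 0)) := by
  intro suf
  induction suf with
  | nil => intro pre d _ v hv; cases hv
  | cons i suf ih =>
    intro pre d hsplit v hv
    have hnotpre : i ∉ pre := by
      subst hsplit
      rcases (List.nodup_append.mp ht) with ⟨_, _, hdisj⟩
      intro hmem
      exact hdisj i hmem i (by simp) rfl
    have hidx : PySem.List.index? t i = some pre.length := by
      rw [PySem.List.index?_eq_some_iff]
      exact ⟨pre, suf, hsplit, rfl, hnotpre⟩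
    have hsplit' : t = (pre ++ [i]) ++ suf := by simp [hsplit]
    have hlen : (pre ++ [i]).length = pre.length + 1 := by simp
    have hnd : (i :: suf).Nodup := by
      subst hsplit; exact (List.nodup_append.mp ht).2.1
    -- the step applied to i produces (d.insert i (pvRank pre.length), pvMedals.drop (pre.length+1))
    have hstep : pvStepA t (d, pvMedals.drop pre.length) i
        = (d.insert i (pvRank pre.length), pvMedals.drop (pre.length + 1)) := by
      by_cases h3 : pre.length < 3
      · rw [pv_drop_medals pre.length h3]
        simp [pvStepA, pvRank, h3]
      · have hdrop : pvMedals.drop pre.length = [] := by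
          apply List.drop_eq_nil_of_le
          simp only [pvMedals, List.length_cons, List.length_nil]; omega
        have hdrop' : pvMedals.drop (pre.length + 1) = [] := by
          apply List.drop_eq_nil_of_le
          simp only [pvMedals, List.length_cons, List.length_nil]; omega
        rw [hdrop, hdrop']
        rw [PySem.List.index?_eq_idxOf?] at hidx
        simp [pvStepA, pvRank, h3, hidx]
    rw [List.foldl_cons, hstep]
    rcases List.mem_cons.mp hv with hv | hv
    · -- v = i : later inserted keys are the elements of suf, all ≠ v
      subst hv
      have hni : v ∉ suf := (List.nodup_cons.mp hnd).1
      have hfix : ∀ (d' : PySem.Dict Int String) (l : List Int), v ∉ l →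
          ((l.foldl (pvStepA t) (d', pvMedals.drop (pre.length + 1))).1).getD v ""
            = d'.getD v "" := by
        intro d' l
        -- generalize over the medal-list component of the state
        suffices h : ∀ (ms : List String) (d' : PySem.Dict Int String), v ∉ l →
            ((l.foldl (pvStepA t) (d', ms)).1).getD v "" = d'.getD v "" by
          exact h _ d'
        induction l with
        | nil => intro ms d' _; rfl
        | cons a l ihl =>
          intro ms d' hvl
          have hva : v ≠ a := fun h => hvl (h ▸ List.mem_cons_self)
          have hvl' : v ∉ l := fun h => hvl (List.mem_cons_of_mem _ h)
          rw [List.foldl_cons]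
          cases ms with
          | nil =>
            rw [show pvStepA t (d', ([] : List String)) a
                = (d'.insert a (PySem.Int.toStr (((PySem.List.index? t a).getD 0 : Int) + 1)), []) from rfl]
            rw [ihl [] _ hvl', PySem.Dict.getD_insert]
            simp [hva]
          | cons m ms' =>
            rw [show pvStepA t (d', m :: ms') a = (d'.insert a m, ms') from rfl]
            rw [ihl ms' _ hvl', PySem.Dict.getD_insert]
            simp [hva]
      rw [hfix _ suf hni, PySem.Dict.getD_insert]
      simp [List.idxOf?_cons, pvRank]
    · -- v ∈ suf, v ≠ i : recurse with pre ++ [i]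
      have hvi : v ≠ i := by
        intro h
        exact (List.nodup_cons.mp hnd).1 (h ▸ hv)
      have := ih (pre ++ [i]) (d.insert i (pvRank pre.length)) hsplit' v hv
      rw [hlen] at this
      rw [this]
      have hidxv : PySem.List.index? (i :: suf) v
          = (PySem.List.index? suf v).map (· + 1) := by
        have hiv : ¬ i = v := fun h => hvi h.symm
        rw [PySem.List.index?_eq_idxOf?, PySem.List.index?_eq_idxOf?]
        simp [List.idxOf?_cons, hiv]
      obtain ⟨k, hk⟩ := PySem.List.index?_isSome_iff (xs := suf) (v := v) |>.2 hv
        |> fun h => Option.isSome_iff_exists.mp h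
      rw [hidxv, hk]
      simp only [Option.map_some, Option.getD_some]
      congr 1
      omega

-- in a strictly descending list, the index of a member is the number of strictly greater elements
theorem pv_index_eq_countP (t : List Int) (hp : t.Pairwise (fun a b => b < a)) :
    ∀ v ∈ t, PySem.List.index? t v = some (t.countP (fun x => decide (v < x))) := by
  induction t with
  | nil => intro v hv; cases hv
  | cons a t ih =>
    intro v hv
    have hgt : ∀ x ∈ t, x < a := List.pairwise_cons.mp hp |>.1
    rcases List.mem_cons.mp hv with hv | hv
    · subst hv
      have : t.countP (fun x => decide (v < x)) = 0 := by
        rw [List.countP_eq_zero]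
        intro x hx
        simp [not_lt.mpr (le_of_lt (hgt x hx))]
      simp [this, List.idxOf?_cons, PySem.List.index?_eq_idxOf?]
    · have hva : v ≠ a := fun h => absurd (h ▸ hgt v hv) (lt_irrefl a)
      have hvlta : v < a := hgt v hv
      rw [PySem.List.index?_eq_idxOf?]
      rw [List.idxOf?_cons]
      have hav : ¬ a = v := fun h => hva h.symm
      simp only [beq_iff_eq, if_neg hav]
      have := ih (List.pairwise_cons.mp hp).2 v hv
      rw [PySem.List.index?_eq_idxOf?] at this
      rw [this]
      simp [hvlta]

-- the final append loop is a map (used for both ports)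
theorem pv_ans_eq (g : Int → String) :
    ∀ (score : List Int) (acc : List String),
      score.foldl (fun ans i => ans ++ [g i]) acc = acc ++ score.map g := by
  intro score
  induction score with
  | nil => simp
  | cons x xs ih => intro acc; simp [ih]

-- ===== VERDICT (by name: the statement is the Claim_ definition above) =====
theorem findRelativeRanks_spec : Claim_equal_findRelativeRanks := by
  intro score _ hpre
  unfold Spec_findRelativeRanks findRelativeRanks findRelativeRanks_alt
  rw [PySem.List.slice?_none_none_neg_one]
  set t := (PySem.List.sorted score (fun x => x) false).reverse with ht
  have hperm : t.Perm score := by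
    rw [ht]
    exact (List.reverse_perm _).trans (PySem.List.sorted_perm score (fun x => x) false)
  have htn : t.Nodup := hperm.nodup_iff.mpr hpre
  have hdesc : t.Pairwise (fun a b => b < a) := by
    rw [ht, List.pairwise_reverse]
    have hle := PySem.List.sorted_pairwise score (fun x => x)
    have hne : (PySem.List.sorted score (fun x => x) false).Nodup :=
      ((PySem.List.sorted_perm score (fun x => x) false).nodup_iff).mpr hpre
    exact (hle.and hne).imp (fun {a b} h => lt_of_le_of_ne h.1 h.2)
  simp only [Option.getD_some]
  rw [pv_ans_eq, pv_ans_eq]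
  simp only [List.nil_append]
  apply List.map_congr_left
  intro v hv
  have hvt : v ∈ t := hperm.mem_iff.mpr hv
  have hd := pv_loop_getD t htn t [] PySem.Dict.empty (by simp) v hvt
  simp only [List.length_nil, Nat.zero_add, List.drop_zero] at hd
  rw [hd, pv_index_eq_countP t hdesc v hvt]
  simp only [Option.getD_some, pvRank]
  rw [hperm.countP_eq]
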